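-- pv_equiv track=rewrite | github.com/I-Man104/DSP | DSP/tasks/task7/convolution.py | convolve_signals
-- ===== SOURCE A (Python) =====
-- def convolve_signals(signal1_indices, signal1_samples, signal2_indices, signal2_samples):
--     m = len(signal1_samples)
--     n = len(signal2_samples)
--     result = [0] * (m + n - 1)  # Initialize the result array with zeros
--     result_indices = [0] * (m + n - 1)  # Initialize the result indices array
--
--     for i in range(m):
--         for j in range(n):
--             result[i + j] += signal1_samples[i] * signal2_samples[j]
--             result_indices[i + j] = signal1_indices[i] + signal2_indices[j]
--
--     return result_indices, result
-- ===== SOURCE B (Python) =====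
-- def convolve_signals(signal1_indices, signal1_samples, signal2_indices, signal2_samples):
--     m = len(signal1_samples)
--     n = len(signal2_samples)
--     values = [sum(signal1_samples[i] * signal2_samples[k - i]
--                   for i in range(max(0, k - n + 1), min(k, m - 1) + 1))
--               for k in range(m + n - 1)]
--     indices = [signal1_indices[min(k, m - 1)] + signal2_indices[k - min(k, m - 1)]
--                for k in range(m + n - 1)]
--     return indices, values
-- ===== Notes on version B (the rewrite author's own statement) =====
-- stated objective: alternative
-- what changed: Replaces the input-pair nested loop with accumulation into preallocated arrays by a single output-centric pass: each output slot k is computed directly as the sum over i in [max(0,k-n+1), min(k,m-1)], and its index as signal1_indices[hi]+signal2_indices[k-hi] for hi=min(k,m-1).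
-- outside the precondition, e.g. on convolve_signals([], [], [1, 2], [3, 4]): A returns ([0], [0]), B raises IndexError; on convolve_signals([1, 2], [3, 4], [9], []): A returns ([0], [0]), B returns ([10], [0])
import Mathlib
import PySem

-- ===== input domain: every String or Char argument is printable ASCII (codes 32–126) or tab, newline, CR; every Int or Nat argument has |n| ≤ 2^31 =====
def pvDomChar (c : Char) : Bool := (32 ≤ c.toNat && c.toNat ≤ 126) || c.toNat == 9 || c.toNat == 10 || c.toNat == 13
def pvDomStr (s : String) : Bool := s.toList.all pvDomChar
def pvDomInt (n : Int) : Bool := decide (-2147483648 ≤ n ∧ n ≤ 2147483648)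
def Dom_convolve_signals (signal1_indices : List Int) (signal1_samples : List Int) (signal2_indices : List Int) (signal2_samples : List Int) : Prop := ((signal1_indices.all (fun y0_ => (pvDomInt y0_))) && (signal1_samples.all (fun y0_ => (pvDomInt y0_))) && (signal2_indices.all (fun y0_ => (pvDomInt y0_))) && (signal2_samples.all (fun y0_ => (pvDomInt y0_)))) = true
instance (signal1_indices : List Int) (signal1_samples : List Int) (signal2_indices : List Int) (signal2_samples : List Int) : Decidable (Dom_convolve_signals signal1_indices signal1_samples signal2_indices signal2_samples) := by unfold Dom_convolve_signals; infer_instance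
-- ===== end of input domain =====

-- B computes each output slot directly (sum over a closed index window per k,
-- and the last-written index pair min(k,m-1)) instead of A's accumulate-into-
-- preallocated-arrays nested loop over input pairs; alternative decomposition, same cost.


-- ===== PORT A =====
-- inner 'for j in range(n)' loop of A (helper for the port); indexing is via getD,
-- which agrees with Python indexing on Pre_ (all indices in range there)
def aInner (signal1_indices : List Int) (signal1_samples : List Int) (signal2_indices : List Int) (signal2_samples : List Int) (st : List Int × List Int) (i : Nat) : List Int × List Int :=
  (List.range signal2_samples.length).foldl (fun st j =>
    (st.1.set (i + j) (st.1.getD (i + j) 0 + signal1_samples.getD i 0 * signal2_samples.getD j 0),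
     st.2.set (i + j) (signal1_indices.getD i 0 + signal2_indices.getD j 0))) st

def convolve_signals (signal1_indices : List Int) (signal1_samples : List Int) (signal2_indices : List Int) (signal2_samples : List Int) : List Int × List Int :=
  let m := signal1_samples.length
  let n := signal2_samples.length
  let st := (List.range m).foldl (aInner signal1_indices signal1_samples signal2_indices signal2_samples)
    (List.replicate (m + n - 1) 0, List.replicate (m + n - 1) 0)
  (st.2, st.1)

-- ===== PORT B =====
def convolve_signals_alt (signal1_indices : List Int) (signal1_samples : List Int) (signal2_indices : List Int) (signal2_samples : List Int) : List Int × List Int :=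
  let m := signal1_samples.length
  let n := signal2_samples.length
  let values := (List.range (m + n - 1)).map (fun k =>
    (List.range' (k + 1 - n) (min k (m - 1) + 1 - (k + 1 - n))).foldl
      (fun s i => s + signal1_samples.getD i 0 * signal2_samples.getD (k - i) 0) 0)
  let indices := (List.range (m + n - 1)).map (fun (k : Nat) =>
    PySem.List.pyGetD signal1_indices (min (k : Int) ((m : Int) - 1)) 0 +
    PySem.List.pyGetD signal2_indices ((k : Int) - min (k : Int) ((m : Int) - 1)) 0)
  (indices, values)

-- ===== PRECONDITION & SPEC =====
-- Pre_ excludes (a) inputs where an index list is shorter than its samples list, on which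
-- A raises IndexError, and (b) inputs where one samples list is empty but the output is
-- nonempty, on which A's returned zero-padded arrays are an artefact of its preallocation
-- (B raises or returns the index sums there); empty-samples inputs with empty output stay inside.
def Pre_convolve_signals (signal1_indices : List Int) (signal1_samples : List Int) (signal2_indices : List Int) (signal2_samples : List Int) : Prop :=
  (0 < signal1_samples.length ∧ 0 < signal2_samples.length ∧
   signal1_samples.length ≤ signal1_indices.length ∧ signal2_samples.length ≤ signal2_indices.length) ∨
  signal1_samples.length + signal2_samples.length ≤ 1
instance (signal1_indices : List Int) (signal1_samples : List Int) (signal2_indices : List Int) (signal2_samples : List Int) : Decidable (Pre_convolve_signals signal1_indices signal1_samples signal2_indices signal2_samples) := by unfold Pre_convolve_signals; infer_instance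

def pvWitness_convolve_signals : List Int × List Int × List Int × List Int := ([1, 2], [3, 4], [5], [6])

def Spec_convolve_signals (signal1_indices : List Int) (signal1_samples : List Int) (signal2_indices : List Int) (signal2_samples : List Int) (out : List Int × List Int) : Prop := out = convolve_signals_alt signal1_indices signal1_samples signal2_indices signal2_samples
instance (signal1_indices : List Int) (signal1_samples : List Int) (signal2_indices : List Int) (signal2_samples : List Int) (out : List Int × List Int) : Decidable (Spec_convolve_signals signal1_indices signal1_samples signal2_indices signal2_samples out) := by unfold Spec_convolve_signals; infer_instance

-- ===== CLAIM (what is proved, stated in full; the proofs are below) =====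
def Claim_equal_convolve_signals : Prop := ∀ (signal1_indices : List Int) (signal1_samples : List Int) (signal2_indices : List Int) (signal2_samples : List Int), Dom_convolve_signals signal1_indices signal1_samples signal2_indices signal2_samples → Pre_convolve_signals signal1_indices signal1_samples signal2_indices signal2_samples → Spec_convolve_signals signal1_indices signal1_samples signal2_indices signal2_samples (convolve_signals signal1_indices signal1_samples signal2_indices signal2_samples)

-- ===== LEMMAS AND PROOFS =====

theorem pv_getD_set (xs : List Int) (i k : Nat) (a : Int) :
    (xs.set i a).getD k 0 = if i = k ∧ i < xs.length then a else xs.getD k 0 := by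
  simp [List.getD, List.getElem?_set]
  split_ifs with h1 h2 h3 <;> simp_all <;> try omega

-- A's inner loop with the iteration count made a parameter (for induction)
def aInnerN (signal1_indices : List Int) (signal1_samples : List Int) (signal2_indices : List Int) (signal2_samples : List Int) (n : Nat) (st : List Int × List Int) (i : Nat) : List Int × List Int :=
  (List.range n).foldl (fun st j =>
    (st.1.set (i + j) (st.1.getD (i + j) 0 + signal1_samples.getD i 0 * signal2_samples.getD j 0),
     st.2.set (i + j) (signal1_indices.getD i 0 + signal2_indices.getD j 0))) st

theorem aInner_eq (i1 s1 i2 s2 : List Int) (st : List Int × List Int) (i : Nat) :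
    aInner i1 s1 i2 s2 st i = aInnerN i1 s1 i2 s2 s2.length st i := rfl

theorem aInnerN_succ (i1 s1 i2 s2 : List Int) (n : Nat) (st : List Int × List Int) (i : Nat) :
    aInnerN i1 s1 i2 s2 (n + 1) st i =
      (let X := aInnerN i1 s1 i2 s2 n st i;
       (X.1.set (i + n) (X.1.getD (i + n) 0 + s1.getD i 0 * s2.getD n 0),
        X.2.set (i + n) (i1.getD i 0 + i2.getD n 0))) := by
  simp [aInnerN, List.range_succ]

theorem aInnerN_len (i1 s1 i2 s2 : List Int) (n : Nat) (st : List Int × List Int) (i : Nat) :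
    (aInnerN i1 s1 i2 s2 n st i).1.length = st.1.length ∧
    (aInnerN i1 s1 i2 s2 n st i).2.length = st.2.length := by
  induction n with
  | zero => simp [aInnerN]
  | succ n ih => rw [aInnerN_succ]; simp [ih.1, ih.2]

theorem aInnerN_getD1 (i1 s1 i2 s2 : List Int) (n : Nat) (st : List Int × List Int) (i k : Nat) :
    (aInnerN i1 s1 i2 s2 n st i).1.getD k 0 =
      st.1.getD k 0 + (if i ≤ k ∧ k < i + n ∧ k < st.1.length then s1.getD i 0 * s2.getD (k - i) 0 else 0) := by
  induction n with
  | zero =>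
    simp only [aInnerN, List.range_zero, List.foldl_nil]
    rw [if_neg (by omega)]; ring
  | succ n ih =>
    rw [aInnerN_succ]
    simp only [pv_getD_set, (aInnerN_len i1 s1 i2 s2 n st i).1]
    by_cases h : i + n = k ∧ i + n < st.1.length
    · have hk : k - i = n := by omega
      rw [if_pos h, h.1, ih, hk]
      rw [if_neg (by omega : ¬ (i ≤ k ∧ k < i + n ∧ k < st.1.length))]
      rw [if_pos (by omega : i ≤ k ∧ k < i + (n + 1) ∧ k < st.1.length)]
      ring
    · rw [if_neg h, ih]
      congr 1
      by_cases h2 : i ≤ k ∧ k < i + n ∧ k < st.1.length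
      · rw [if_pos h2, if_pos (by omega : i ≤ k ∧ k < i + (n + 1) ∧ k < st.1.length)]
      · rw [if_neg h2, if_neg (by omega : ¬ (i ≤ k ∧ k < i + (n + 1) ∧ k < st.1.length))]

theorem aInnerN_getD2 (i1 s1 i2 s2 : List Int) (n : Nat) (st : List Int × List Int) (i k : Nat) :
    (aInnerN i1 s1 i2 s2 n st i).2.getD k 0 =
      if i ≤ k ∧ k < i + n ∧ k < st.2.length then i1.getD i 0 + i2.getD (k - i) 0
      else st.2.getD k 0 := by
  induction n with
  | zero =>
    simp only [aInnerN, List.range_zero, List.foldl_nil]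
    rw [if_neg (by omega)]
  | succ n ih =>
    rw [aInnerN_succ]
    simp only [pv_getD_set, (aInnerN_len i1 s1 i2 s2 n st i).2]
    by_cases h : i + n = k ∧ i + n < st.2.length
    · have hk : (k : Nat) - i = n := by omega
      rw [if_pos h, if_pos (by omega : i ≤ k ∧ k < i + (n + 1) ∧ k < st.2.length), hk]
    · rw [if_neg h, ih]
      by_cases h2 : i ≤ k ∧ k < i + n ∧ k < st.2.length
      · rw [if_pos h2, if_pos (by omega : i ≤ k ∧ k < i + (n + 1) ∧ k < st.2.length)]
      · rw [if_neg h2, if_neg (by omega : ¬ (i ≤ k ∧ k < i + (n + 1) ∧ k < st.2.length))]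

-- A's outer loop with preallocated arrays of length L, after t iterations
def outA (i1 s1 i2 s2 : List Int) (L t : Nat) : List Int × List Int :=
  (List.range t).foldl (aInner i1 s1 i2 s2) (List.replicate L 0, List.replicate L 0)

theorem convolve_signals_eq_outA (i1 s1 i2 s2 : List Int) :
    convolve_signals i1 s1 i2 s2 =
      ((outA i1 s1 i2 s2 (s1.length + s2.length - 1) s1.length).2,
       (outA i1 s1 i2 s2 (s1.length + s2.length - 1) s1.length).1) := rfl

theorem outA_succ (i1 s1 i2 s2 : List Int) (L t : Nat) :
    outA i1 s1 i2 s2 L (t + 1) = aInnerN i1 s1 i2 s2 s2.length (outA i1 s1 i2 s2 L t) t := by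
  simp [outA, List.range_succ, aInner_eq]

theorem outA_len (i1 s1 i2 s2 : List Int) (L t : Nat) :
    (outA i1 s1 i2 s2 L t).1.length = L ∧ (outA i1 s1 i2 s2 L t).2.length = L := by
  induction t with
  | zero => simp [outA]
  | succ t ih =>
    rw [outA_succ]
    rw [(aInnerN_len i1 s1 i2 s2 s2.length _ t).1, (aInnerN_len i1 s1 i2 s2 s2.length _ t).2]
    exact ih

theorem outA_getD1 (i1 s1 i2 s2 : List Int) (L t k : Nat) :
    (outA i1 s1 i2 s2 L t).1.getD k 0 =
      ∑ i ∈ Finset.range t, (if i ≤ k ∧ k < i + s2.length ∧ k < L then s1.getD i 0 * s2.getD (k - i) 0 else 0) := by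
  induction t with
  | zero => simp [outA, List.getD]
  | succ t ih =>
    rw [outA_succ, aInnerN_getD1, ih, (outA_len i1 s1 i2 s2 L t).1]
    rw [Finset.sum_range_succ]

theorem outA_getD2 (i1 s1 i2 s2 : List Int) (L t k : Nat) (hn : 0 < s2.length) :
    (outA i1 s1 i2 s2 L t).2.getD k 0 =
      if k < L ∧ k + 1 - s2.length < t then
        i1.getD (min k (t - 1)) 0 + i2.getD (k - min k (t - 1)) 0
      else 0 := by
  induction t with
  | zero =>
    simp only [outA, List.range_zero, List.foldl_nil]
    rw [if_neg (by omega)]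
    simp [List.getD]
  | succ t ih =>
    rw [outA_succ, aInnerN_getD2, (outA_len i1 s1 i2 s2 L t).2]
    try rw [ih]
    by_cases h : t ≤ k ∧ k < t + s2.length ∧ k < L
    · rw [if_pos h, if_pos (by omega : k < L ∧ k + 1 - s2.length < t + 1)]
      have hmin : min k (t + 1 - 1) = t := by omega
      rw [hmin]
    · rw [if_neg h]
      by_cases h2 : k < L ∧ k + 1 - s2.length < t
      · rw [if_pos h2, if_pos (by omega : k < L ∧ k + 1 - s2.length < t + 1)]
        have hmin : min k (t + 1 - 1) = min k (t - 1) := by omega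
        rw [hmin]
      · rw [if_neg h2, if_neg (by omega : ¬ (k < L ∧ k + 1 - s2.length < t + 1))]

theorem pv_foldl_add_range' (f : Nat → Int) (a len : Nat) :
    (List.range' a len).foldl (fun s i => s + f i) 0 = ∑ i ∈ Finset.Ico a (a + len), f i := by
  induction len with
  | zero => simp
  | succ len ih =>
    rw [List.range'_concat, List.foldl_append, ih, List.foldl_cons, List.foldl_nil]
    rw [show a + (len + 1) = (a + len) + 1 by omega, Finset.sum_Ico_succ_top (by omega)]
    norm_num

theorem convolve_signals_spec : Claim_equal_convolve_signals := by
  intro i1 s1 i2 s2 _hdom hpre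
  unfold Spec_convolve_signals
  rcases hpre with ⟨hm, hn, _, _⟩ | hsmall
  case inr =>
    have hL : s1.length + s2.length - 1 = 0 := by omega
    rw [convolve_signals_eq_outA]
    unfold convolve_signals_alt
    have h1 := (outA_len i1 s1 i2 s2 (s1.length + s2.length - 1) s1.length).1
    have h2 := (outA_len i1 s1 i2 s2 (s1.length + s2.length - 1) s1.length).2
    rw [hL] at h1 h2
    refine Prod.ext ?_ ?_ <;>
      simp [List.length_eq_zero_iff.mp h1, List.length_eq_zero_iff.mp h2, hL]
  rw [convolve_signals_eq_outA]
  unfold convolve_signals_alt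
  refine Prod.ext ?_ ?_
  · -- indices component
    apply List.ext_getElem
    · simp [(outA_len i1 s1 i2 s2 (s1.length + s2.length - 1) s1.length).2]
    · intro k hk1 hk2
      have hkL : k < s1.length + s2.length - 1 := by
        simpa [(outA_len i1 s1 i2 s2 (s1.length + s2.length - 1) s1.length).2] using hk1
      rw [← List.getD_eq_getElem _ 0 hk1]
      rw [outA_getD2 i1 s1 i2 s2 (s1.length + s2.length - 1) s1.length k hn]
      rw [if_pos (by omega : k < s1.length + s2.length - 1 ∧ k + 1 - s2.length < s1.length)]
      simp only [List.getElem_map, List.getElem_range]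
      have hmin : min (k : Int) ((s1.length : Int) - 1) = ((min k (s1.length - 1) : Nat) : Int) := by
        push_cast; omega
      have hsub : (k : Int) - min (k : Int) ((s1.length : Int) - 1)
          = ((k - min k (s1.length - 1) : Nat) : Int) := by omega
      rw [hsub, hmin, PySem.List.pyGetD_natCast, PySem.List.pyGetD_natCast]
  · -- values component
    apply List.ext_getElem
    · simp [(outA_len i1 s1 i2 s2 (s1.length + s2.length - 1) s1.length).1]
    · intro k hk1 hk2
      have hkL : k < s1.length + s2.length - 1 := by
        simpa [(outA_len i1 s1 i2 s2 (s1.length + s2.length - 1) s1.length).1] using hk1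
      rw [← List.getD_eq_getElem _ 0 hk1]
      rw [outA_getD1 i1 s1 i2 s2 (s1.length + s2.length - 1) s1.length k]
      simp only [List.getElem_map, List.getElem_range]
      rw [pv_foldl_add_range']
      rw [show k + 1 - s2.length + (min k (s1.length - 1) + 1 - (k + 1 - s2.length))
            = min k (s1.length - 1) + 1 by omega]
      rw [← Finset.sum_filter]
      apply Finset.sum_congr
      · apply Finset.ext
        intro i
        simp only [Finset.mem_filter, Finset.mem_range, Finset.mem_Ico]
        omega
      · intro i _; rfl
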